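-- pv_equiv track=rewrite | github.com/blaoke/leetcode_answer | 序号题200+/1185.py | yici
-- ===== SOURCE A (Python) =====
-- def yici(a: [int], b: [int], c: [int]):
--     for i in range(len(a)):
--         if a[i] == 0:
--             b.append('out')
--             break
--         elif a[i] == 10:
--             c.append('out')
--         else:
--             a[i] += 1
--     return a, b, c
-- ===== SOURCE B (Python) =====
-- def yici(a: [int], b: [int], c: [int]):
--     # Stop point = first 0 (or end); then rebuild the prefix branchlessly and
--     # count the 10s, instead of deciding per element inside a stateful loop.
--     try:
--         k = a.index(0)
--         found = True
--     except ValueError: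
--         k = len(a)
--         found = False
--     pre = a[:k]
--     a[:k] = [x + (x != 10) for x in pre]
--     c.extend(['out'] * pre.count(10))
--     if found:
--         b.append('out')
--     return a, b, c
-- ===== Notes on version B (the rewrite author's own statement) =====
-- stated objective: alternative
-- what changed: B replaces A's stateful break-driven loop by staged whole-list operations: locate the first 0 with index, rebuild the prefix with a branchless map x+(x!=10) assigned back by slice, extend c by 'out' times the prefix's count of 10, and append to b once iff a 0 was found.
import Mathlib
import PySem

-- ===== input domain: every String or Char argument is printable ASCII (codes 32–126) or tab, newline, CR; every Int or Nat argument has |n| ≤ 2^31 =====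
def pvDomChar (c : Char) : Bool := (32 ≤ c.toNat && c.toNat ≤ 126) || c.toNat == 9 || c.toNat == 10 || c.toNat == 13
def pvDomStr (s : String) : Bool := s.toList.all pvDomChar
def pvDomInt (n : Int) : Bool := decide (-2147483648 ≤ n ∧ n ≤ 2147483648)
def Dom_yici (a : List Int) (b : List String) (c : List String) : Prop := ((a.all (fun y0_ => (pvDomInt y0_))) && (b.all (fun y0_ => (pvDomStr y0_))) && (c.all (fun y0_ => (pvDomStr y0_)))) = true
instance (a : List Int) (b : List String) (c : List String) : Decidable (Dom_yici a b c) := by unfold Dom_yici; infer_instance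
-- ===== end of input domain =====

-- B replaces A's break-driven element-by-element loop by staged whole-list operations
-- (index of first 0, branchless map over the prefix, count of 10s); the equivalence is
-- about the RETURN value (both Pythons also mutate a/b/c in place, to the same lists).

-- ===== PORT A =====
-- A's for-loop with break: recursion over the index i into a, mutating a via set.
def yiciAux (a : List Int) (b c : List String) (i : Nat) : List Int × List String × List String :=
  if h : i < a.length then
    let x := a[i]
    if x = 0 then (a, b ++ ["out"], c)
    else if x = 10 then yiciAux a b (c ++ ["out"]) (i + 1)
    else yiciAux (a.set i (x + 1)) b c (i + 1)
  else (a, b, c)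
termination_by a.length - i
decreasing_by
  · omega
  · simp only [List.length_set]; omega

def yici (a : List Int) (b : List String) (c : List String) : List Int × List String × List String :=
  yiciAux a b c 0

-- ===== PORT B =====
-- try: k = a.index(0); found = True / except: k = len(a); found = False
-- pre = a[:k]; a[:k] = [x + (x != 10) for x in pre]; c.extend(['out'] * pre.count(10)); if found: b.append('out')
def yici_alt (a : List Int) (b : List String) (c : List String) : List Int × List String × List String :=
  let r := PySem.List.index? a 0
  let k : Nat := match r with | some j => j | none => a.length
  let found : Bool := r.isSome
  let pre := a.take k
  let a' := pre.map (fun x => x + (if x ≠ 10 then 1 else 0)) ++ a.drop k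
  let c' := c ++ List.replicate (pre.count 10) "out"
  let b' := if found then b ++ ["out"] else b
  (a', b', c')

-- ===== PRECONDITION & SPEC =====
def Spec_yici (a : List Int) (b : List String) (c : List String) (out : List Int × List String × List String) : Prop := out = yici_alt a b c
instance (a : List Int) (b : List String) (c : List String) (out : List Int × List String × List String) : Decidable (Spec_yici a b c out) := by unfold Spec_yici; infer_instance

-- ===== CLAIM (what is proved, stated in full; the proofs are below) =====
def Claim_equal_yici : Prop := ∀ (a : List Int) (b : List String) (c : List String), Dom_yici a b c → Spec_yici a b c (yici a b c)

-- ===== LEMMAS AND PROOFS =====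

-- index of the first 0 in a at position ≥ i (a.length if none)
def fz (a : List Int) (i : Nat) : Nat :=
  if h : i < a.length then (if a[i] = 0 then i else fz a (i + 1)) else a.length
termination_by a.length - i

theorem fz_le (a : List Int) (i : Nat) : fz a i ≤ a.length := by
  rw [fz]
  split
  · split
    · omega
    · exact fz_le a (i + 1)
  · exact le_refl _
termination_by a.length - i

theorem fz_ge (a : List Int) (i : Nat) (h : i ≤ a.length) : i ≤ fz a i := by
  rw [fz]
  split
  · split
    · exact le_refl _
    · exact Nat.le_of_succ_le (fz_ge a (i + 1) (by omega))
  · exact h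
termination_by a.length - i

theorem fz_set (a : List Int) (i : Nat) (v : Int) (j : Nat) (hij : i < j) :
    fz (a.set i v) j = fz a j := by
  conv_rhs => rw [fz]
  conv_lhs => rw [fz]
  simp only [List.length_set]
  split
  · rw [List.getElem_set_ne (by omega)]
    split
    · rfl
    · exact fz_set a i v (j + 1) (by omega)
  · rfl
termination_by a.length - j

theorem fz_eq_of (a : List Int) (i k : Nat) (hk : k < a.length) (h0 : a[k] = 0)
    (hmin : ∀ j (hj : j < a.length), i ≤ j → j < k → a[j] ≠ 0) (hik : i ≤ k) : fz a i = k := by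
  rw [fz]
  split
  · rename_i h
    split
    · rename_i hz
      by_contra hne
      exact hmin i h (le_refl _) (by omega) hz
    · rename_i hz
      have hik' : i + 1 ≤ k := by
        have hne : i ≠ k := by rintro rfl; exact hz h0
        omega
      exact fz_eq_of a (i + 1) k hk h0 (fun j hj h1 h2 => hmin j hj (by omega) h2) hik'
  · omega
termination_by k - i

theorem fz_eq_len_of_no_zero (a : List Int) (i : Nat) (h : (0 : Int) ∉ a) : fz a i = a.length := by
  rw [fz]
  split
  · rename_i hlt
    split
    · rename_i hz
      exact absurd (hz ▸ List.getElem_mem hlt) h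
    · exact fz_eq_len_of_no_zero a (i + 1) h
  · rfl
termination_by a.length - i

-- fz 0 agrees with B's k computation
theorem fz_zero_eq_index (a : List Int) :
    fz a 0 = (match PySem.List.index? a 0 with | some j => j | none => a.length) := by
  cases hidx : PySem.List.index? a 0 with
  | none =>
    have h0 : (0 : Int) ∉ a := (PySem.List.index?_eq_none_iff a 0).1 hidx
    simpa using fz_eq_len_of_no_zero a 0 h0
  | some k =>
    obtain ⟨hk, hk0, hmin⟩ := PySem.List.getElem_of_index?_eq_some hidx
    exact fz_eq_of a 0 k hk hk0 (fun j hj _ h2 => hmin j h2) (Nat.zero_le _)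

-- B's per-element rewrite
def fB (x : Int) : Int := x + (if x ≠ 10 then 1 else 0)

-- main invariant: A's loop from index i produces B's staged shape on the region [i, fz a i)
theorem main_inv (n : Nat) : ∀ (a : List Int) (b c : List String) (i : Nat),
    a.length - i ≤ n →
    yiciAux a b c i =
      ( a.take i ++ ((a.drop i).take (fz a i - i)).map fB ++ a.drop (fz a i),
        if fz a i < a.length then b ++ ["out"] else b,
        c ++ List.replicate (((a.drop i).take (fz a i - i)).count 10) "out" ) := by
  induction n with
  | zero =>
    intro a b c i hn
    have hlen : a.length ≤ i := by omega
    rw [yiciAux, fz]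
    simp only [dif_neg (by omega : ¬ i < a.length)]
    simp [List.take_of_length_le hlen, List.drop_of_length_le hlen]
  | succ n ih =>
    intro a b c i hn
    rw [yiciAux]
    by_cases h : i < a.length
    · simp only [dif_pos h]
      have hdropcons : a.drop i = a[i] :: a.drop (i + 1) := List.drop_eq_getElem_cons h
      by_cases hz : a[i] = 0
      · rw [if_pos hz]
        have hfz : fz a i = i := by rw [fz]; simp [h, hz]
        simp [hfz, h, List.take_append_drop]
      · rw [if_neg hz]
        have hfz : fz a i = fz a (i + 1) := by rw [fz]; simp [h, hz]
        have hge : i + 1 ≤ fz a (i + 1) := fz_ge a (i + 1) (by omega)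
        have htake : (a.drop i).take (fz a i - i)
            = a[i] :: (a.drop (i + 1)).take (fz a (i + 1) - (i + 1)) := by
          rw [hfz, hdropcons]
          have : fz a (i + 1) - i = (fz a (i + 1) - (i + 1)) + 1 := by omega
          rw [this, List.take_succ_cons]
        have htakesucc : a.take (i + 1) = a.take i ++ [a[i]] := by
          rw [List.take_add_one, List.getElem?_eq_getElem h]; rfl
        by_cases h10 : a[i] = 10
        · rw [if_pos h10]
          rw [ih a b (c ++ ["out"]) (i + 1) (by omega)]
          rw [htake]
          simp [hfz, fB, h10, htakesucc, List.replicate_succ]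
        · rw [if_neg h10]
          rw [ih (a.set i (a[i] + 1)) b c (i + 1) (by simp only [List.length_set]; omega)]
          have hfz2 : fz (a.set i (a[i] + 1)) (i + 1) = fz a (i + 1) :=
            fz_set a i (a[i] + 1) (i + 1) (by omega)
          have hd1 : (a.set i (a[i] + 1)).drop (i + 1) = a.drop (i + 1) :=
            List.drop_set_of_lt (by omega)
          have hd2 : (a.set i (a[i] + 1)).drop (fz a (i + 1)) = a.drop (fz a (i + 1)) :=
            List.drop_set_of_lt (by omega)
          have ht0 : (a.set i (a[i] + 1)).take i = a.take i := List.take_set_of_le (le_refl i)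
          have ht1 : (a.set i (a[i] + 1)).take (i + 1) = a.take i ++ [a[i] + 1] := by
            rw [List.take_add_one, ht0, List.getElem?_set_self (by simpa using h)]
            rfl
          rw [htake]
          simp only [hfz, hfz2, List.length_set, hd1, hd2, ht1]
          simp [fB, h10, List.append_assoc]
    · simp only [dif_neg h]
      rw [fz]
      simp only [dif_neg h]
      have hlen : a.length ≤ i := by omega
      simp [List.take_of_length_le hlen, List.drop_of_length_le hlen]

theorem index_isSome_iff_fz_lt (a : List Int) :
    (PySem.List.index? a 0).isSome = true ↔ fz a 0 < a.length := by
  rw [fz_zero_eq_index]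
  cases hidx : PySem.List.index? a 0 with
  | none => simp
  | some k =>
    obtain ⟨hk, _, _⟩ := PySem.List.getElem_of_index?_eq_some hidx
    simpa using hk

-- ===== VERDICT (by name: the statement is the Claim_ definition above) =====
theorem yici_spec : Claim_equal_yici := by
  intro a b c _
  have hmap : fB = (fun x : Int => x + if x = 10 then 0 else 1) := by
    funext x; by_cases hx : x = 10 <;> simp [fB, hx]
  show yici a b c = yici_alt a b c
  rw [yici, main_inv (a.length) a b c 0 (by omega)]
  simp only [yici_alt, ← fz_zero_eq_index]
  have hfound := index_isSome_iff_fz_lt a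
  cases hf : (PySem.List.index? a 0).isSome with
  | false =>
    have : ¬ fz a 0 < a.length := by rw [← hfound, hf]; simp
    simp [hmap, this, List.take_zero, List.drop_zero]
  | true =>
    have : fz a 0 < a.length := hfound.1 hf
    simp [hmap, this, List.take_zero, List.drop_zero]
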